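-- pv_equiv track=rewrite | github.com/xBorox1/D-Wave-Leap---CVRP | vrp/vrp_problem.py | decode_answer_with_limits
-- ===== SOURCE A (Python) =====
-- def decode_answer_with_limits(sample, vehicles_limits):
--     result = list()
--     vehicle_result = list()
--     step = 0
--     vehicle = 0
--
--     for (s, dest) in sample:
--         if sample[(s, dest)] == 1:
--             if dest != 0:
--                 vehicle_result.append(dest)
--             step += 1
--             if vehicles_limits[vehicle] == step:
--                 result.append(vehicle_result)
--                 step = 0
--                 vehicle += 1
--                 vehicle_result = list()
--                 if len(vehicles_limits) <= vehicle:
--                     return result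
--
--     return result
-- ===== SOURCE B (Python) =====
-- def decode_answer_with_limits(sample, vehicles_limits):
--     # Phase 1: collect all destinations whose variable is set (zeros kept:
--     # they count toward a vehicle's step budget).
--     active = [dest for (s, dest) in sample if sample[(s, dest)] == 1]
--     # Phase 2: carve `active` into one bucket per vehicle.
--     result = []
--     for limit in vehicles_limits:
--         if limit <= 0 or limit > len(active):
--             return result
--         result.append([d for d in active[:limit] if d != 0])
--         active = active[limit:]
--     return result
-- ===== Notes on version B (the rewrite author's own statement) =====
-- stated objective: simpler
-- what changed: A's single loop with step/vehicle counters and a partial-bucket accumulator is replaced by two plain phases: first collect the list of active destinations (value 1, zeros kept for the step budget), then carve that list into one take/drop bucket per vehicle limit, stopping when a limit is non-positive or cannot be filled.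
import Mathlib
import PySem

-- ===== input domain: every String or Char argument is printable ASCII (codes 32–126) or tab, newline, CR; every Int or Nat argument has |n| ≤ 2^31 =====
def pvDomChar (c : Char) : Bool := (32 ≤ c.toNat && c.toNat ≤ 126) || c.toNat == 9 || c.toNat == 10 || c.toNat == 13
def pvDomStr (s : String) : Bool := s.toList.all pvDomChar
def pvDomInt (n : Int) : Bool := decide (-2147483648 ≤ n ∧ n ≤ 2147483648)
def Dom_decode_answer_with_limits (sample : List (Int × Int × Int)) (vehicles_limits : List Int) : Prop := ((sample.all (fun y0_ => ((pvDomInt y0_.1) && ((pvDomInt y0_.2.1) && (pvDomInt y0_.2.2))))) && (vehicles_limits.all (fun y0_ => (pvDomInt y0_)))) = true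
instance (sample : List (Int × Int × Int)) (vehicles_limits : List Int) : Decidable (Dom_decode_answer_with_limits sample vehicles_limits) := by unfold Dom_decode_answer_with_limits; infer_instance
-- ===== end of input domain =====

-- B replaces A's single stateful loop (step/vehicle counters, partial bucket) by two
-- plain phases: collect the active destinations, then carve them into per-vehicle
-- buckets; same return value wherever A returns (objective: simpler).

-- ===== PORT A =====
-- sample[(s, dest)]: first-match lookup of key (s, dest) in the association list
-- (exact for a Python dict, whose keys are distinct).
def lookupSD : List (Int × Int × Int) → Int → Int → Option Int
  | [], _, _ => none
  | (s', d', v) :: rest, s, d => if s' = s ∧ d' = d then some v else lookupSD rest s d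

-- the for-loop of A, one recursive step per dict item; state (result, vehicle_result,
-- step, vehicle).  Where Python raises IndexError (vehicles_limits[vehicle] with the
-- list empty) the port returns the accumulator; Pre_ excludes those inputs.
def decodeLoopA (sample0 : List (Int × Int × Int)) (vl : List Int) :
    List (Int × Int × Int) → List (List Int) → List Int → Int → Int → List (List Int)
  | [], res, _, _, _ => res
  | (s, dest, _) :: rest, res, vr, step, veh =>
    if lookupSD sample0 s dest = some 1 then
      let vr' := if dest ≠ 0 then vr ++ [dest] else vr
      let step' := step + 1
      match PySem.List.pyGet? vl veh with
      | none => res  -- IndexError in Python; outside Pre_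
      | some L =>
        if L = step' then
          let res' := res ++ [vr']
          if (vl.length : Int) ≤ veh + 1 then res'
          else decodeLoopA sample0 vl rest res' [] 0 (veh + 1)
        else decodeLoopA sample0 vl rest res vr' step' veh
    else decodeLoopA sample0 vl rest res vr step veh

def decode_answer_with_limits (sample : List (Int × Int × Int)) (vehicles_limits : List Int) : List (List Int) :=
  decodeLoopA sample vehicles_limits sample [] [] 0 0

-- ===== PORT B =====
-- active = [dest for (s, dest) in sample if sample[(s, dest)] == 1]
def activeDests (sample : List (Int × Int × Int)) : List Int :=
  sample.filterMap (fun t => if lookupSD sample t.1 t.2.1 = some 1 then some t.2.1 else none)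

-- the for-loop of B: one bucket per vehicle limit (active[:limit] / active[limit:]
-- with 0 < limit are List.take / List.drop).
def fillBuckets : List Int → List Int → List (List Int) → List (List Int)
  | _, [], res => res
  | active, L :: rest, res =>
    if L ≤ 0 ∨ (active.length : Int) < L then res
    else fillBuckets (active.drop L.toNat) rest (res ++ [(active.take L.toNat).filter (· ≠ 0)])

def decode_answer_with_limits_alt (sample : List (Int × Int × Int)) (vehicles_limits : List Int) : List (List Int) :=
  fillBuckets (activeDests sample) vehicles_limits []

-- ===== PRECONDITION & SPEC =====
-- Pre_ excludes exactly the inputs on which Python A raises IndexError: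
-- vehicles_limits empty while some dict item has value 1.
def Pre_decode_answer_with_limits (sample : List (Int × Int × Int)) (vehicles_limits : List Int) : Prop :=
  vehicles_limits ≠ [] ∨ ∀ t ∈ sample, t.2.2 ≠ 1
instance (sample : List (Int × Int × Int)) (vehicles_limits : List Int) : Decidable (Pre_decode_answer_with_limits sample vehicles_limits) := by unfold Pre_decode_answer_with_limits; infer_instance

def pvWitness_decode_answer_with_limits : (List (Int × Int × Int)) × List Int :=
  ([(0, 1, 1), (0, 2, 1), (1, 0, 1), (1, 3, 0)], [2, 1])

def Spec_decode_answer_with_limits (sample : List (Int × Int × Int)) (vehicles_limits : List Int) (out : List (List Int)) : Prop := out = decode_answer_with_limits_alt sample vehicles_limits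
instance (sample : List (Int × Int × Int)) (vehicles_limits : List Int) (out : List (List Int)) : Decidable (Spec_decode_answer_with_limits sample vehicles_limits out) := by unfold Spec_decode_answer_with_limits; infer_instance

-- ===== CLAIM (what is proved, stated in full; the proofs are below) =====
def Claim_equal_decode_answer_with_limits : Prop := ∀ (sample : List (Int × Int × Int)) (vehicles_limits : List Int), Dom_decode_answer_with_limits sample vehicles_limits → Pre_decode_answer_with_limits sample vehicles_limits → Spec_decode_answer_with_limits sample vehicles_limits (decode_answer_with_limits sample vehicles_limits)
-- ===== LEMMAS AND PROOFS =====

-- A's loop, restricted to the active destinations, with the remaining limits as a list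
-- (head = current vehicle's limit).
def goC : List Int → List Int → List (List Int) → List Int → Int → List (List Int)
  | [], _, res, _, _ => res
  | _ :: _, [], res, _, _ => res
  | d :: rest, L :: restL, res, vr, step =>
    let vr' := if d ≠ 0 then vr ++ [d] else vr
    if L = step + 1 then
      if restL = [] then res ++ [vr'] else goC rest restL (res ++ [vr']) [] 0
    else goC rest (L :: restL) res vr' (step + 1)

lemma decodeLoopA_eq_goC (sample0 : List (Int × Int × Int)) (vl : List Int) :
    ∀ (rem : List (Int × Int × Int)) (res : List (List Int)) (vr : List Int) (step : Int) (k : Nat),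
      decodeLoopA sample0 vl rem res vr step (k : Int) =
        goC (rem.filterMap (fun t => if lookupSD sample0 t.1 t.2.1 = some 1 then some t.2.1 else none))
            (vl.drop k) res vr step := by
  intro rem
  induction rem with
  | nil => intro res vr step k; simp [decodeLoopA, goC]
  | cons t rest ih =>
    intro res vr step k
    obtain ⟨s, dest, v⟩ := t
    by_cases hl : lookupSD sample0 s dest = some 1
    · have hget : PySem.List.pyGet? vl (k : Int) = vl[k]? := PySem.List.pyGet?_natCast vl k
      have hhd : vl[k]? = (vl.drop k).head? := List.head?_drop.symm
      cases hdk : vl.drop k with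
      | nil =>
        have : vl[k]? = none := by rw [hhd, hdk, List.head?_nil]
        simp only [decodeLoopA, hl, hget, this]
        simp [goC, hl]
      | cons L restL =>
        have hsome : vl[k]? = some L := by rw [hhd, hdk]; rfl
        have hrest : vl.drop (k + 1) = restL := by
          rw [← List.tail_drop, hdk, List.tail_cons]
        have hlenrest : ((vl.length : Int) ≤ (k : Int) + 1) ↔ restL = [] := by
          rw [← hrest, List.drop_eq_nil_iff]
          omega
        simp only [decodeLoopA, hl, hget, hsome]
        by_cases hL : L = step + 1
        · simp only [if_pos hL]
          by_cases hr : restL = []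
          · rw [if_pos (hlenrest.mpr hr)]
            simp [goC, hl, hL, hr]
          · rw [if_neg (fun h => hr (hlenrest.mp h))]
            have : ((k : Int) + 1) = ((k + 1 : Nat) : Int) := by push_cast; ring
            rw [this, ih _ _ _ (k + 1), hrest]
            simp [goC, hl, hL, hr]
        · simp only [if_neg hL]
          rw [ih _ _ _ k, hdk]
          simp [goC, hl, hL]
    · simp only [decodeLoopA, if_neg hl]
      rw [ih _ _ _ k]
      simp [hl]

-- One whole vehicle of goC at once: with step already taken out of budget L, either the
-- remaining budget cannot be met (A drops the partial bucket) or exactly L - step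
-- elements are consumed into one bucket.
lemma goC_key (L : Int) (restL : List Int) :
    ∀ (active : List Int) (res : List (List Int)) (vr : List Int) (step : Int), 0 ≤ step →
      goC active (L :: restL) res vr step =
        if L ≤ step ∨ (active.length : Int) < L - step then res
        else
          if restL = [] then res ++ [vr ++ (active.take (L - step).toNat).filter (· ≠ 0)]
          else goC (active.drop (L - step).toNat) restL
                 (res ++ [vr ++ (active.take (L - step).toNat).filter (· ≠ 0)]) [] 0 := by
  intro active
  induction active with
  | nil =>
    intro res vr step hstep
    have : (L ≤ step ∨ (([] : List Int).length : Int) < L - step) := by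
      by_cases h : L ≤ step
      · exact Or.inl h
      · exact Or.inr (by simp; omega)
    simp [goC]
  | cons d rest ih =>
    intro res vr step hstep
    by_cases hL : L = step + 1
    · have hc : ¬ (L ≤ step ∨ ((d :: rest).length : Int) < L - step) := by
        simp only [List.length_cons]; push_cast; omega
      have ht : (L - step).toNat = 1 := by omega
      rw [if_neg hc, ht]
      simp only [goC, if_pos hL, List.take_succ_cons, List.take_zero, List.drop_succ_cons,
        List.drop_zero]
      by_cases hd : d ≠ 0
      · simp [hd, List.filter]
      · simp only [ne_eq, not_not] at hd
        subst hd; simp [List.filter]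
    · simp only [goC, if_neg hL]
      rw [ih _ _ (step + 1) (by omega)]
      by_cases h1 : L ≤ step
      · rw [if_pos (Or.inl (by omega : L ≤ step + 1)), if_pos (Or.inl h1)]
      · by_cases h2 : (rest.length : Int) < L - (step + 1)
        · have h2' : (((d :: rest).length : Int) < L - step) := by
            simp only [List.length_cons]; push_cast; omega
          rw [if_pos (Or.inr h2), if_pos (Or.inr h2')]
        · have hn1 : ¬ (L ≤ step + 1 ∨ (rest.length : Int) < L - (step + 1)) := by omega
          have hn2 : ¬ (L ≤ step ∨ (((d :: rest).length : Int) < L - step)) := by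
            simp only [List.length_cons]; push_cast; omega
          rw [if_neg hn1, if_neg hn2]
          have htake : ((d :: rest).take (L - step).toNat) = d :: rest.take (L - (step + 1)).toNat := by
            have h3 : (L - step).toNat = (L - (step + 1)).toNat + 1 := by omega
            rw [h3, List.take_succ_cons]
          have hdrop : ((d :: rest).drop (L - step).toNat) = rest.drop (L - (step + 1)).toNat := by
            have h3 : (L - step).toNat = (L - (step + 1)).toNat + 1 := by omega
            rw [h3, List.drop_succ_cons]
          rw [htake, hdrop]
          by_cases hd : d ≠ 0
          · simp [hd]
          · simp only [ne_eq, not_not] at hd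
            subst hd
            simp

lemma goC_eq_fillBuckets : ∀ (vl active : List Int) (res : List (List Int)),
    goC active vl res [] 0 = fillBuckets active vl res := by
  intro vl
  induction vl with
  | nil => intro active res; cases active <;> simp [goC, fillBuckets]
  | cons L restL ih =>
    intro active res
    rw [goC_key L restL active res [] 0 le_rfl]
    simp only [sub_zero, List.nil_append, fillBuckets]
    by_cases hc : L ≤ 0 ∨ (active.length : Int) < L
    · rw [if_pos hc, if_pos hc]
    · rw [if_neg hc, if_neg hc]
      by_cases hr : restL = []
      · subst hr; simp [fillBuckets]
      · rw [if_neg hr, ih]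

-- ===== VERDICT (by name: the statement is the Claim_ definition above) =====
theorem decode_answer_with_limits_spec : Claim_equal_decode_answer_with_limits := by
  intro sample vehicles_limits _ _
  unfold Spec_decode_answer_with_limits decode_answer_with_limits decode_answer_with_limits_alt activeDests
  have h := decodeLoopA_eq_goC sample vehicles_limits sample [] [] 0 0
  simpa [goC_eq_fillBuckets] using h
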